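-- pv_equiv track=rewrite | github.com/Egezenn/OpenDotaGuides | compiler.py | remove_repeated_elements
-- ===== SOURCE A (Python) =====
-- def remove_repeated_elements(input_list):
--     seen = set()
--     result = []
--
--     for lst in input_list:
--         new_lst = [element for element in lst if element not in seen]
--         seen.update(new_lst)
--         result.append(new_lst)
--
--     return result
-- ===== SOURCE B (Python) =====
-- def remove_repeated_elements(input_list):
--     # Two passes: first record, for every element, the index of the first
--     # sublist it occurs in; then rebuild each sublist keeping exactly the
--     # elements whose first-occurrence index is that sublist's index.
--     first_index = {}
--     for i, lst in enumerate(input_list):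
--         for element in lst:
--             if element not in first_index:
--                 first_index[element] = i
--     return [[element for element in lst if first_index[element] == i]
--             for i, lst in enumerate(input_list)]
-- ===== Notes on version B (the rewrite author's own statement) =====
-- stated objective: alternative
-- what changed: Replaces the single pass that filters against a growing 'seen' set with a two-pass scheme: a first pass builds a dict mapping each element to the index of the first sublist containing it, and a second pass keeps an element iff its first-occurrence index equals the current sublist index.
import Mathlib
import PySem

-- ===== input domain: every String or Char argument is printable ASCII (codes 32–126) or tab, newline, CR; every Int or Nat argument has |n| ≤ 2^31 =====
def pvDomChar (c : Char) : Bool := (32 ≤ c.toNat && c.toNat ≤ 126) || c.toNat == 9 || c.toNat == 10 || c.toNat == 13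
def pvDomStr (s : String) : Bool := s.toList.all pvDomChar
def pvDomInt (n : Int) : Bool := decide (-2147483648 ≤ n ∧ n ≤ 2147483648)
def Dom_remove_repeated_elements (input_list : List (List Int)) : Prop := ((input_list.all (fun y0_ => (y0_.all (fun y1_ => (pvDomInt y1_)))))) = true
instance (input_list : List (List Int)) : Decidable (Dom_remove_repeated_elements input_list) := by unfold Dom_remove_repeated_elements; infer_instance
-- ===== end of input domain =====

-- B replaces A's single filter-against-a-growing-seen-set pass by a two-pass
-- first-occurrence-index dict scheme (alternative decomposition, same cost).

-- ===== PORT A =====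
-- seen = set(); result = []; for lst in input_list: filter against seen, update seen, append.
def remove_repeated_elements (input_list : List (List Int)) : List (List Int) :=
  (input_list.foldl
    (fun (st : PySem.Set Int × List (List Int)) lst =>
      let new_lst := lst.filter (fun element => !(PySem.Set.contains st.1 element))
      (PySem.Set.update st.1 new_lst, st.2 ++ [new_lst]))
    ((PySem.Set.empty : PySem.Set Int), ([] : List (List Int)))).2

-- ===== PORT B =====
-- first pass: first_index[element] = i on first encounter; second pass:
-- keep element iff first_index[element] == i (the key is always present
-- during the second pass, so Python's first_index[element] is get? … = some …).
def remove_repeated_elements_alt (input_list : List (List Int)) : List (List Int) :=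
  let first_index : PySem.Dict Int Int :=
    (PySem.List.enumerate input_list 0).foldl
      (fun d p => p.2.foldl
        (fun d element => if d.contains element then d else d.insert element p.1) d)
      PySem.Dict.empty
  (PySem.List.enumerate input_list 0).map
    (fun p => p.2.filter (fun element => first_index.get? element == some p.1))

-- ===== PRECONDITION & SPEC =====
def Spec_remove_repeated_elements (input_list : List (List Int)) (out : List (List Int)) : Prop := out = remove_repeated_elements_alt input_list
instance (input_list : List (List Int)) (out : List (List Int)) : Decidable (Spec_remove_repeated_elements input_list out) := by unfold Spec_remove_repeated_elements; infer_instance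

-- ===== CLAIM (what is proved, stated in full; the proofs are below) =====
def Claim_equal_remove_repeated_elements : Prop := ∀ (input_list : List (List Int)), Dom_remove_repeated_elements input_list → Spec_remove_repeated_elements input_list (remove_repeated_elements input_list)

-- ===== LEMMAS AND PROOFS =====

-- Reference function: filter each sublist against the elements of all earlier sublists.
def pvSpec (seen : List Int) : List (List Int) → List (List Int)
  | [] => []
  | l :: r => l.filter (fun e => !(seen.contains e)) :: pvSpec (seen ++ l) r

theorem pvSpec_congr (s t : List Int) (h : ∀ e, e ∈ s ↔ e ∈ t) :
    ∀ L, pvSpec s L = pvSpec t L := by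
  intro L
  induction L generalizing s t with
  | nil => rfl
  | cons l r ih =>
    simp only [pvSpec]
    refine congrArg₂ List.cons ?_ (ih _ _ (by intro e; simp [h e]))
    apply List.filter_congr
    intro e _
    rw [Bool.eq_iff_iff]
    simp [h e]

theorem pv_mem_update (s : PySem.Set Int) (xs : List Int) (e : Int) :
    e ∈ PySem.Set.update s xs ↔ e ∈ s ∨ e ∈ xs := by
  induction xs generalizing s with
  | nil => simp [PySem.Set.update]
  | cons x r ih =>
    show e ∈ PySem.Set.update (PySem.Set.add s x) r ↔ _
    rw [ih]
    simp [PySem.Set.mem_add]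
    tauto

theorem pvA_fold (L : List (List Int)) :
    ∀ (s : PySem.Set Int) (acc : List (List Int)),
    (L.foldl
      (fun (st : PySem.Set Int × List (List Int)) lst =>
        let new_lst := lst.filter (fun element => !(PySem.Set.contains st.1 element))
        (PySem.Set.update st.1 new_lst, st.2 ++ [new_lst]))
      (s, acc)).2 = acc ++ pvSpec s L := by
  induction L with
  | nil => intro s acc; simp [pvSpec]
  | cons l r ih =>
    intro s acc
    simp only [List.foldl_cons]
    rw [ih]
    have hcong : pvSpec (PySem.Set.update s (l.filter (fun element => !(PySem.Set.contains s element)))) r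
        = pvSpec (s ++ l) r := by
      apply pvSpec_congr
      intro e
      rw [pv_mem_update]
      simp only [List.mem_filter, List.mem_append, PySem.Set.contains]
      by_cases he : e ∈ s <;> simp [he]
    rw [hcong]
    simp [pvSpec, PySem.Set.contains]

-- first-occurrence index of x among the sublists of L
def pvFIdx : List (List Int) → Int → Option Int
  | [], _ => none
  | l :: r, x => if l.contains x then some 0 else (pvFIdx r x).map (· + 1)

theorem pvInner (l : List Int) (k : Int) :
    ∀ (d : PySem.Dict Int Int) (x : Int),
    (l.foldl (fun d element => if d.contains element then d else d.insert element k) d).get? x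
      = (d.get? x).or (if l.contains x then some k else none) := by
  induction l with
  | nil => intro d x; simp
  | cons e r ih =>
    intro d x
    simp only [List.foldl_cons]
    rw [ih]
    by_cases hde : d.contains e
    · rw [if_pos hde]
      cases hdx : d.get? x with
      | some v => simp
      | none =>
        have hxe : ¬ (x = e) := by
          intro h; subst h
          rw [PySem.Dict.contains_eq_isSome_get?, hdx] at hde; simp at hde
        have : (e :: r).contains x = r.contains x := by
          simp [hxe]
        rw [this]
    · rw [if_neg hde]
      by_cases hxe : x = e
      · subst hxe
        rw [PySem.Dict.contains_eq_isSome_get?] at hde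
        have hdx : d.get? x = none := by
          cases h : d.get? x; · rfl
          · rw [h] at hde; simp at hde
        rw [PySem.Dict.get?_insert, if_pos rfl, hdx]
        have : (x :: r).contains x = true := by simp
        rw [this, if_pos rfl]
        simp
      · rw [PySem.Dict.get?_insert, if_neg hxe]
        have : (e :: r).contains x = r.contains x := by
          simp [hxe]
        rw [this]

theorem pvOuter (L : List (List Int)) :
    ∀ (k : Int) (d : PySem.Dict Int Int) (x : Int),
    ((PySem.List.enumerate L k).foldl
      (fun d (p : Int × List Int) => p.2.foldl
        (fun d element => if d.contains element then d else d.insert element p.1) d)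
      d).get? x
      = (d.get? x).or ((pvFIdx L x).map (fun n => k + n)) := by
  induction L with
  | nil => intro k d x; simp [PySem.List.enumerate, pvFIdx]
  | cons l r ih =>
    intro k d x
    rw [PySem.List.enumerate_cons]
    simp only [List.foldl_cons]
    rw [ih, pvInner l k, Option.or_assoc]
    congr 1
    simp only [pvFIdx]
    by_cases hc : l.contains x
    · rw [if_pos hc, if_pos hc]
      simp
    · rw [if_neg hc, if_neg hc, Option.none_or]
      cases pvFIdx r x with
      | none => simp
      | some n => simp; ring

theorem pvFIdx_spec (L : List (List Int)) :
    ∀ (i : Nat) (x : Int), i < L.length → x ∈ L.getD i [] →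
    (pvFIdx L x = some (i : Int) ↔ ∀ j < i, x ∉ L.getD j []) := by
  induction L with
  | nil => intro i x hi; simp at hi
  | cons l r ih =>
    intro i x hi hx
    cases i with
    | zero =>
      have hc : l.contains x = true := by
        rw [List.contains_iff_mem]; simpa using hx
      simp only [pvFIdx]
      rw [if_pos hc]
      simp
    | succ j =>
      have hxr : x ∈ r.getD j [] := by simpa using hx
      have hj : j < r.length := by simpa using hi
      simp only [pvFIdx]
      by_cases hc : l.contains x
      · have hxl : x ∈ l := List.contains_iff_mem.mp hc
        rw [if_pos hc]
        constructor
        · intro h; exfalso; simp at h; omega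
        · intro h; exfalso; exact (h 0 (Nat.succ_pos j)) (by simpa using hxl)
      · have hxl : x ∉ l := fun hm => hc (List.contains_iff_mem.mpr hm)
        rw [if_neg hc]
        have hstep : ((pvFIdx r x).map (· + 1) = some ((j + 1 : Nat) : Int))
            ↔ pvFIdx r x = some (j : Int) := by
          cases h : pvFIdx r x with
          | none => simp
          | some n => push_cast; simp
        rw [hstep, ih j x hj hxr]
        constructor
        · intro h j' hj'
          cases j' with
          | zero => simpa using hxl
          | succ j'' => simpa using h j'' (by omega)
        · intro h j' hj'
          simpa using h (j' + 1) (by omega)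

theorem pvMapSpec (L : List (List Int)) :
    ∀ (k : Int) (seen : List Int) (d : PySem.Dict Int Int),
    (∀ (i : Nat) (x : Int), i < L.length → x ∈ L.getD i [] →
      (d.get? x = some (k + i) ↔ x ∉ seen ∧ ∀ j < i, x ∉ L.getD j [])) →
    (PySem.List.enumerate L k).map
      (fun p => p.2.filter (fun element => d.get? element == some p.1))
      = pvSpec seen L := by
  induction L with
  | nil => intro k seen d _; rfl
  | cons l r ih =>
    intro k seen d H
    rw [PySem.List.enumerate_cons]
    simp only [List.map_cons, pvSpec]
    refine congrArg₂ List.cons ?_ ?_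
    · apply List.filter_congr
      intro e he
      have h0 := H 0 e (by simp) (by simpa using he)
      simp only [Nat.cast_zero, add_zero] at h0
      rw [Bool.eq_iff_iff]
      simp only [beq_iff_eq, Bool.not_eq_eq_eq_not, Bool.not_true,
        List.contains_eq_mem, decide_eq_false_iff_not]
      rw [h0]
      simp
    · apply ih (k + 1) (seen ++ l) d
      intro i x hi hx
      have h := H (i + 1) x (by simpa using Nat.succ_lt_succ hi) (by simpa using hx)
      have harith : k + ((i + 1 : Nat) : Int) = k + 1 + (i : Nat) := by push_cast; ring
      rw [harith] at h
      rw [h]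
      constructor
      · rintro ⟨hs, hall⟩
        refine ⟨?_, ?_⟩
        · simp only [List.mem_append, not_or]
          exact ⟨hs, by simpa using hall 0 (Nat.succ_pos i)⟩
        · intro j hj; simpa using hall (j + 1) (by omega)
      · rintro ⟨hs, hall⟩
        simp only [List.mem_append, not_or] at hs
        refine ⟨hs.1, ?_⟩
        intro j hj
        cases j with
        | zero => simpa using hs.2
        | succ j' => simpa using hall j' (by omega)

-- ===== VERDICT (by name: the statement is the Claim_ definition above) =====
theorem remove_repeated_elements_spec : Claim_equal_remove_repeated_elements := by
  intro input_list _
  unfold Spec_remove_repeated_elements remove_repeated_elements remove_repeated_elements_alt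
  rw [pvA_fold]
  rw [pvMapSpec input_list 0 ([] : List Int)]
  · simp [PySem.Set.empty]
  · intro i x hi hx
    rw [pvOuter]
    have hempty : (PySem.Dict.empty : PySem.Dict Int Int).get? x = none := rfl
    rw [hempty, Option.none_or]
    have hmap : Option.map (fun n => (0 : Int) + n) (pvFIdx input_list x) = pvFIdx input_list x := by
      cases pvFIdx input_list x <;> simp
    rw [hmap]
    simp only [zero_add]
    rw [pvFIdx_spec input_list i x hi hx]
    simp
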